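-- pv_equiv track=rewrite | github.com/ngocuong0105/usaco | silver/lemonade.py | solve
-- ===== SOURCE A (Python) =====
-- from typing import Any
--
-- def solve(inp) -> Any:
--     N, nums = inp
--     nums.sort(reverse = True)
--     res,wait = 0,0
--     for i in range(N):
--         res += nums[i]>=wait
--         wait += nums[i]>=wait
--     return res
-- ===== SOURCE B (Python) =====
-- def solve(inp):
--     N, nums = inp
--     nums.sort(reverse=True)
--     # After the descending sort, "nums[i] >= wait" holds exactly for i below the
--     # first failure index, so the answer is the least i in [0, N) with nums[i] < i
--     # (or N if none): find it by binary search on that monotone predicate.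
--     lo, hi = 0, N
--     while lo < hi:
--         mid = (lo + hi) // 2
--         if nums[mid] >= mid:
--             lo = mid + 1
--         else:
--             hi = mid
--     return lo
-- ===== Notes on version B (the rewrite author's own statement) =====
-- stated objective: alternative
-- what changed: B replaces A's linear scan with a running wait/res accumulator by a binary search on the descending-sorted list for the first index i with nums[i] < i, which equals A's served count; the sort is kept to preserve the in-place mutation.
import Mathlib
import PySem

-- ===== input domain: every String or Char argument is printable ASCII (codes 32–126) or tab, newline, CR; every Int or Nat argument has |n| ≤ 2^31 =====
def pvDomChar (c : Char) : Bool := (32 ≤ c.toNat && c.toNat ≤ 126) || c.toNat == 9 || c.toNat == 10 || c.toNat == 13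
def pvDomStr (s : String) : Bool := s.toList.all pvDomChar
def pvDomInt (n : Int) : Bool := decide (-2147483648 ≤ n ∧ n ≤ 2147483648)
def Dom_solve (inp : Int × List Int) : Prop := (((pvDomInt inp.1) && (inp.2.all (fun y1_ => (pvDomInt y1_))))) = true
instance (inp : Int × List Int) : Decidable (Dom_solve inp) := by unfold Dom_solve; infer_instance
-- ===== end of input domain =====

-- B finds A's served count by binary search for the first index i with nums[i] < i on the
-- descending-sorted list, instead of A's linear scan with a wait/res accumulator
-- (alternative algorithm; both Pythons sort nums in place, the claim is about the return value).


-- ===== PORT A =====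
-- one loop step of A: res += nums[i] >= wait; wait += nums[i] >= wait
def pvStepA (nums : List Int) (st : Int × Int) (i : Int) : Int × Int :=
  (st.1 + (if PySem.List.pyGetD nums i 0 ≥ st.2 then 1 else 0),
   st.2 + (if PySem.List.pyGetD nums i 0 ≥ st.2 then 1 else 0))

def solve (inp : Int × List Int) : Int :=
  let N := inp.1
  let nums := PySem.List.sorted inp.2 (fun x => x) true
  let st := (PySem.List.pyRange 0 N 1).foldl (pvStepA nums) (0, 0)
  st.1

-- ===== PORT B =====
-- B's while loop: lo, hi shrink around the first index with nums[mid] < mid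
def pvBsearch (nums : List Int) (lo hi : Int) : Int :=
  if h : lo < hi then
    let mid := PySem.Int.floordiv (lo + hi) 2
    if PySem.List.pyGetD nums mid 0 ≥ mid then pvBsearch nums (mid + 1) hi
    else pvBsearch nums lo mid
  else lo
termination_by (hi - lo).toNat
decreasing_by
  · have h1 := (PySem.Int.floordiv_two_mid_bounds (le_of_lt h)).1
    omega
  · have h2 : PySem.Int.floordiv (lo + hi) 2 < hi :=
      (PySem.Int.floordiv_lt_iff_lt_mul (a := lo + hi) (b := 2) (q := hi) (by omega)).2 (by omega)
    omega

def solve_alt (inp : Int × List Int) : Int :=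
  let N := inp.1
  let nums := PySem.List.sorted inp.2 (fun x => x) true
  pvBsearch nums 0 N

-- ===== PRECONDITION & SPEC =====
-- A raises IndexError when N exceeds len(nums) (the loop indexes nums[i] for i < N);
-- Pre_ excludes exactly those inputs.
def Pre_solve (inp : Int × List Int) : Prop := inp.1 ≤ (inp.2.length : Int)
instance (inp : Int × List Int) : Decidable (Pre_solve inp) := by unfold Pre_solve; infer_instance
def pvWitness_solve : (Int × List Int) := (2, [3, 0, 5])
def Spec_solve (inp : Int × List Int) (out : Int) : Prop := out = solve_alt inp
instance (inp : Int × List Int) (out : Int) : Decidable (Spec_solve inp out) := by unfold Spec_solve; infer_instance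

-- ===== CLAIM (what is proved, stated in full; the proofs are below) =====
def Claim_equal_solve : Prop := ∀ (inp : Int × List Int), Dom_solve inp → Pre_solve inp → Spec_solve inp (solve inp)

-- ===== LEMMAS AND PROOFS =====

-- Descending order, pointwise: indices j ≤ i read non-increasing values.
theorem pv_sorted_mono (g : List Int) (hs : g.Pairwise (fun a b => b ≤ a))
    (j i : Nat) (hji : j ≤ i) (hi : i < g.length) : g.getD i 0 ≤ g.getD j 0 := by
  rcases Nat.lt_or_ge j i with h | h
  · have := (List.pairwise_iff_getElem.mp hs) j i (lt_of_le_of_lt hji hi) hi h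
    simpa [List.getD_eq_getElem?_getD, List.getElem?_eq_getElem, hi,
      lt_of_le_of_lt hji hi] using this
  · have : j = i := le_antisymm hji h
    subst this; rfl

-- Loop invariant for A: after n steps the state is (m, m) where m is the first
-- failure index so far: every index below m succeeded, and either m = n or g[m] < m.
theorem pv_foldA (g : List Int) (hs : g.Pairwise (fun a b => b ≤ a)) :
    ∀ n : Nat, n ≤ g.length →
      ∃ m : Nat,
        (PySem.List.pyRange 0 (n : Int) 1).foldl (pvStepA g) (0, 0) = ((m : Int), (m : Int)) ∧
        m ≤ n ∧ (∀ i : Nat, i < m → (i : Int) ≤ g.getD i 0) ∧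
        (m = n ∨ g.getD m 0 < (m : Int)) := by
  intro n
  induction n with
  | zero => intro _; exact ⟨0, by simp [PySem.List.pyRange_one_eq_nil], by omega, by omega, Or.inl rfl⟩
  | succ n ih =>
    intro hle
    have hnlt : n < g.length := hle
    obtain ⟨m, hst, hmn, hall, hdisj⟩ := ih (Nat.le_of_succ_le hle)
    have hsplit : PySem.List.pyRange 0 ((n + 1 : Nat) : Int) 1
        = PySem.List.pyRange 0 (n : Int) 1 ++ [(n : Int)] := by
      have := PySem.List.pyRange_one_succ_right (a := 0) (b := (n : Int)) (by positivity)
      rw [show ((n + 1 : Nat) : Int) = (n : Int) + 1 by push_cast; ring, this]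
    have hfold : (PySem.List.pyRange 0 ((n + 1 : Nat) : Int) 1).foldl (pvStepA g) (0, 0)
        = pvStepA g ((m : Int), (m : Int)) (n : Int) := by
      rw [hsplit, List.foldl_append, hst]; rfl
    have hget : PySem.List.pyGetD g ((n : Nat) : Int) 0 = g.getD n 0 := by
      simp [PySem.List.pyGetD_natCast]
    by_cases hm : m = n
    · subst hm
      by_cases hc : g.getD m 0 ≥ (m : Int)
      · refine ⟨m + 1, ?_, by omega, ?_, Or.inl rfl⟩
        · rw [hfold]; simp only [pvStepA, hget, if_pos hc]; push_cast; ring_nf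
        · intro i hi
          rcases Nat.lt_or_ge i m with h | h
          · exact hall i h
          · have : i = m := by omega
            subst this; exact hc
      · refine ⟨m, ?_, by omega, hall, Or.inr (lt_of_not_ge hc)⟩
        rw [hfold]; simp only [pvStepA, hget, if_neg hc]; simp
    · -- m < n; the first failure already happened: g[n] ≤ g[m] < m, step is a no-op
      have hmlt : m < n := by omega
      have hgm : g.getD m 0 < (m : Int) := by
        rcases hdisj with h | h
        · omega
        · exact h
      have hmono : g.getD n 0 ≤ g.getD m 0 := pv_sorted_mono g hs m n (Nat.le_of_lt hmlt) hnlt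
      have hc : ¬ (g.getD n 0 ≥ (m : Int)) := by omega
      refine ⟨m, ?_, by omega, hall, Or.inr hgm⟩
      rw [hfold]; simp only [pvStepA, hget, if_neg hc]; simp

-- Binary-search invariant for B: if m is the first failure index and lo ≤ m ≤ hi,
-- the search converges to m.
theorem pv_bsearch (g : List Int) (hs : g.Pairwise (fun a b => b ≤ a)) (N : Int)
    (hN : N ≤ (g.length : Int)) (m : Nat) (hmN : (m : Int) ≤ N)
    (hall : ∀ i : Nat, i < m → (i : Int) ≤ g.getD i 0)
    (hdisj : (m : Int) = N ∨ g.getD m 0 < (m : Int)) :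
    ∀ (k : Nat) (lo hi : Int), (hi - lo).toNat ≤ k → 0 ≤ lo → lo ≤ (m : Int) →
      (m : Int) ≤ hi → hi ≤ N → pvBsearch g lo hi = (m : Int) := by
  intro k
  induction k with
  | zero =>
    intro lo hi hk h0 hlom hmhi _
    have : ¬ lo < hi := by omega
    rw [pvBsearch, dif_neg this]; omega
  | succ k ih =>
    intro lo hi hk h0 hlom hmhi hhiN
    by_cases h : lo < hi
    · rw [pvBsearch, dif_pos h]
      have hmid1 := (PySem.Int.floordiv_two_mid_bounds (le_of_lt h)).1
      have hmid2 : PySem.Int.floordiv (lo + hi) 2 < hi :=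
        (PySem.Int.floordiv_lt_iff_lt_mul (a := lo + hi) (b := 2) (q := hi) (by omega)).2 (by omega)
      set mid := PySem.Int.floordiv (lo + hi) 2 with hmiddef
      have hmidnat : mid = ((mid.toNat : Nat) : Int) := by omega
      have hmidlen : mid.toNat < g.length := by omega
      have hgetmid : PySem.List.pyGetD g mid 0 = g.getD mid.toNat 0 := by
        conv_lhs => rw [hmidnat, PySem.List.pyGetD_natCast]
      by_cases hc : PySem.List.pyGetD g mid 0 ≥ mid
      · -- success at mid ⇒ mid < m
        have hmmid : mid < (m : Int) := by
          by_contra hge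
          have hmmidnat : m ≤ mid.toNat := by omega
          have hgN : (m : Int) < N := by omega
          have hgm : g.getD m 0 < (m : Int) := by
            rcases hdisj with hh | hh
            · omega
            · exact hh
          have := pv_sorted_mono g hs m mid.toNat hmmidnat hmidlen
          rw [hgetmid] at hc; omega
        simp only [if_pos hc]
        exact ih (mid + 1) hi (by omega) (by omega) (by omega) hmhi hhiN
      · -- failure at mid ⇒ m ≤ mid
        have hmmid : (m : Int) ≤ mid := by
          by_contra hlt
          have : mid.toNat < m := by omega
          have := hall mid.toNat this
          rw [hgetmid] at hc; omega
        simp only [if_neg hc]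
        exact ih lo mid (by omega) h0 hlom hmmid (by omega)
    · rw [pvBsearch, dif_neg h]; omega

-- ===== VERDICT (by name: the statement is the Claim_ definition above) =====
theorem solve_spec : Claim_equal_solve := by
  intro inp _ hpre
  unfold Spec_solve solve solve_alt
  obtain ⟨N, nums⟩ := inp
  simp only
  by_cases hN : N ≤ 0
  · rw [PySem.List.pyRange_one_eq_nil hN, pvBsearch, dif_neg (by omega : ¬ (0:Int) < N)]; rfl
  · set g := PySem.List.sorted nums (fun x => x) true with hg
    have hs : g.Pairwise (fun a b => b ≤ a) := by
      simpa using PySem.List.sorted_pairwise_rev (xs := nums) (key := fun x => x)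
    have hlen : g.length = nums.length := PySem.List.length_sorted nums _ _
    have hle : N.toNat ≤ g.length := by
      have : N ≤ (nums.length : Int) := hpre
      omega
    obtain ⟨m, hst, hmn, hall, hdisj⟩ := pv_foldA g hs N.toNat hle
    have hNn : N = ((N.toNat : Nat) : Int) := by omega
    have hA : (PySem.List.pyRange 0 N 1).foldl (pvStepA g) (0, 0) = ((m : Int), (m : Int)) := by
      rw [hNn]; exact hst
    have hB : pvBsearch g 0 N = (m : Int) := by
      refine pv_bsearch g hs N (by omega) m (by omega) hall ?_ (N - 0).toNat 0 N
        (by omega) (by omega) (by omega) (by omega) (by omega)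
      rcases hdisj with h | h
      · left; omega
      · right; exact h
    rw [hA, hB]
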